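-- pv_equiv track=rewrite | github.com/Matt2371/DL-reservoir-modeling | src/data/alternate_releases.py | get_implied_storage
-- ===== SOURCE A (Python) =====
-- def get_implied_storage(inflow, outflow, initial_storage=1, initial_release=1):
--     """
--     Calculate implied storage given inflow and outflow arrays
--     """
--
--     implied_storages = []
--     prev_implied_storage = initial_storage
--     prev_release = initial_release
--     for i in range(len(inflow)):
--         # Calculate current implied storage
--         current_implied_storage = prev_implied_storage + inflow[i] - prev_release
--         implied_storages.append(current_implied_storage)
--
--         # Update prev_release and prev_implied_storage for next timestep
--         prev_implied_storage = current_implied_storage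
--         prev_release = outflow[i]
--     return implied_storages
-- ===== SOURCE B (Python) =====
-- def get_implied_storage(inflow, outflow, initial_storage=1, initial_release=1):
--     n = len(inflow)
--     # prefix sums: cum_in[i] = inflow[0] + ... + inflow[i]
--     cum_in = []
--     t = 0
--     for x in inflow:
--         t += x
--         cum_in.append(t)
--     # cum_out[i] = outflow[0] + ... + outflow[i-1]  (0 at i = 0); only the
--     # first n-1 outflows ever influence the balance
--     cum_out = [0]
--     t = 0
--     for y in outflow[:max(n - 1, 0)]:
--         t += y
--         cum_out.append(t)
--     base = initial_storage - initial_release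
--     return [base + cum_in[i] - cum_out[i] for i in range(n)]
-- ===== Notes on version B (the rewrite author's own statement) =====
-- stated objective: alternative
-- what changed: Replaces the stateful loop threading prev_storage/prev_release with two prefix-sum tables (cumulative inflow and cumulative prior outflow) combined in one closing comprehension: storage[i] = initial_storage - initial_release + cum_in[i] - cum_out_before[i].
import Mathlib
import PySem

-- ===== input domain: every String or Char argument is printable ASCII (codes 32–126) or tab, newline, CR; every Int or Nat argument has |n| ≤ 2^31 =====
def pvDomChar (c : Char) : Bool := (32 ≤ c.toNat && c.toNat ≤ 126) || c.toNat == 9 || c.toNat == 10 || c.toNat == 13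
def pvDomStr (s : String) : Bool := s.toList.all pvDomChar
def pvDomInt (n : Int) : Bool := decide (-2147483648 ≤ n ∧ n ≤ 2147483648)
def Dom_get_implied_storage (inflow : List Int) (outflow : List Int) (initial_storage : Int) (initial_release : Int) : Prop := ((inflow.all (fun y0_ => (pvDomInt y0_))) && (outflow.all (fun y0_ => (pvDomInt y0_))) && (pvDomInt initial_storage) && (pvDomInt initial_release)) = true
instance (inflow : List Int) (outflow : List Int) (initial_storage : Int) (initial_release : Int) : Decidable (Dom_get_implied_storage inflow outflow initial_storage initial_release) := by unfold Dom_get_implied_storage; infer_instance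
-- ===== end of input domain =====

-- B computes the same implied-storage series from two prefix-sum tables instead of a stateful
-- running-balance loop (alternative decomposition, same cost); Pre_ excludes the IndexError case.


-- ===== PORT A =====
-- for i in range(len(inflow)): cur = prev_storage + inflow[i] - prev_release; append; update state
def get_implied_storage (inflow : List Int) (outflow : List Int) (initial_storage : Int) (initial_release : Int) : List Int :=
  ((PySem.List.pyRange 0 (inflow.length : Int) 1).foldl
    (fun (st : List Int × Int × Int) i =>
      let cur := st.2.1 + PySem.List.pyGetD inflow i 0 - st.2.2
      (st.1 ++ [cur], cur, PySem.List.pyGetD outflow i 0))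
    ([], initial_storage, initial_release)).1

-- ===== PORT B =====
-- prefix-sum tables cum_in and cum_out (outflow truncated to the first n-1 entries), then one map
def get_implied_storage_alt (inflow : List Int) (outflow : List Int) (initial_storage : Int) (initial_release : Int) : List Int :=
  let n : Int := inflow.length
  let cum_in := (inflow.foldl
      (fun (p : List Int × Int) x => (p.1 ++ [p.2 + x], p.2 + x)) ([], 0)).1
  let cum_out := ((PySem.List.slice outflow (some 0) (some (max (n - 1) 0))).foldl
      (fun (p : List Int × Int) y => (p.1 ++ [p.2 + y], p.2 + y)) ([0], 0)).1
  let base := initial_storage - initial_release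
  (PySem.List.pyRange 0 n 1).map
    (fun i => base + PySem.List.pyGetD cum_in i 0 - PySem.List.pyGetD cum_out i 0)

-- ===== PRECONDITION & SPEC =====
-- A reads outflow[i] for every i < len(inflow) (the last read is unused), so it raises
-- IndexError when 0 < len(inflow) and len(outflow) < len(inflow): Pre_ excludes exactly that.
def Pre_get_implied_storage (inflow : List Int) (outflow : List Int) (initial_storage : Int) (initial_release : Int) : Prop :=
  inflow = [] ∨ inflow.length ≤ outflow.length
instance (inflow : List Int) (outflow : List Int) (initial_storage : Int) (initial_release : Int) : Decidable (Pre_get_implied_storage inflow outflow initial_storage initial_release) := by unfold Pre_get_implied_storage; infer_instance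

def pvWitness_get_implied_storage : List Int × List Int × Int × Int := ([1, 2], [3, 4], 5, 6)

def Spec_get_implied_storage (inflow : List Int) (outflow : List Int) (initial_storage : Int) (initial_release : Int) (out : List Int) : Prop := out = get_implied_storage_alt inflow outflow initial_storage initial_release
instance (inflow : List Int) (outflow : List Int) (initial_storage : Int) (initial_release : Int) (out : List Int) : Decidable (Spec_get_implied_storage inflow outflow initial_storage initial_release out) := by unfold Spec_get_implied_storage; infer_instance

-- ===== CLAIM (what is proved, stated in full; the proofs are below) =====
def Claim_equal_get_implied_storage : Prop := ∀ (inflow : List Int) (outflow : List Int) (initial_storage : Int) (initial_release : Int), Dom_get_implied_storage inflow outflow initial_storage initial_release → Pre_get_implied_storage inflow outflow initial_storage initial_release → Spec_get_implied_storage inflow outflow initial_storage initial_release (get_implied_storage inflow outflow initial_storage initial_release)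

-- ===== LEMMAS AND PROOFS =====

-- the closed form both programs compute: storage i = S - R + Σ inflow[0..i] - Σ outflow[0..i-1]
def pvCF (inflow outflow : List Int) (S R : Int) (i : Nat) : Int :=
  S - R + (inflow.take (i + 1)).sum - (outflow.take i).sum

lemma pv_psum (l : List Int) (acc : List Int) (t : Int) :
    l.foldl (fun (p : List Int × Int) x => (p.1 ++ [p.2 + x], p.2 + x)) (acc, t)
    = (acc ++ (List.range l.length).map (fun i => t + (l.take (i + 1)).sum), t + l.sum) := by
  induction l generalizing acc t with
  | nil => simp
  | cons x xs ih =>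
    simp only [List.foldl_cons]
    rw [ih]
    simp [List.range_succ_eq_map, List.map_map, Function.comp_def, add_assoc]

lemma pv_sum_take_getD (l : List Int) (k : Nat) :
    (l.take (k + 1)).sum = (l.take k).sum + l.getD k 0 := by
  by_cases h : k < l.length
  · rw [List.sum_take_succ l k h, List.getD_eq_getElem l 0 h]
  · rw [List.take_of_length_le (by omega), List.take_of_length_le (by omega),
      List.getD_eq_default l 0 (by omega)]
    simp

lemma pv_Aloop (outflow : List Int) (S R : Int) (inflow : List Int) :
    ((PySem.List.pyRange 0 (inflow.length : Int) 1).foldl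
      (fun (st : List Int × Int × Int) i =>
        let cur := st.2.1 + PySem.List.pyGetD inflow i 0 - st.2.2
        (st.1 ++ [cur], cur, PySem.List.pyGetD outflow i 0))
      ([], S, R))
    = ((List.range inflow.length).map (pvCF inflow outflow S R),
       (if inflow.length = 0 then S else pvCF inflow outflow S R (inflow.length - 1)),
       (if inflow.length = 0 then R else outflow.getD (inflow.length - 1) 0)) := by
  induction inflow using List.reverseRecOn with
  | nil => simp [PySem.List.pyRange_one_eq_nil]
  | append_singleton xs x ih =>
    have hlen : ((xs ++ [x]).length : Int) = (xs.length : Int) + 1 := by simp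
    rw [hlen, PySem.List.pyRange_one_succ_right (by positivity), List.foldl_append]
    have hcongr : List.foldl
        (fun (st : List Int × Int × Int) i =>
          let cur := st.2.1 + PySem.List.pyGetD (xs ++ [x]) i 0 - st.2.2
          (st.1 ++ [cur], cur, PySem.List.pyGetD outflow i 0))
        ([], S, R) (PySem.List.pyRange 0 (xs.length : Int))
      = List.foldl
        (fun (st : List Int × Int × Int) i =>
          let cur := st.2.1 + PySem.List.pyGetD xs i 0 - st.2.2
          (st.1 ++ [cur], cur, PySem.List.pyGetD outflow i 0))
        ([], S, R) (PySem.List.pyRange 0 (xs.length : Int)) := by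
      apply PySem.List.foldl_congr_mem
      intro acc i hi
      rw [PySem.List.mem_pyRange_one] at hi
      have : PySem.List.pyGetD (xs ++ [x]) i 0 = PySem.List.pyGetD xs i 0 := by
        rw [PySem.List.pyGetD_eq_getElem _ _ hi.1 (by simp; omega),
            PySem.List.pyGetD_eq_getElem _ _ hi.1 (by omega)]
        exact List.getElem_append_left (by omega)
      simp [this]
    rw [hcongr, ih]
    simp only [List.foldl_cons, List.foldl_nil]
    have hx : PySem.List.pyGetD (xs ++ [x]) (xs.length : Int) 0 = x := by
      rw [PySem.List.pyGetD_natCast]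
      simp
    rw [hx]
    by_cases h0 : xs.length = 0
    · rcases List.eq_nil_of_length_eq_zero h0 with rfl
      simp [pvCF, PySem.List.pyGetD_zero, List.getD]
      ring
    · have h1 : (xs.length - 1) + 1 = xs.length := by omega
      have hcur : pvCF xs outflow S R (xs.length - 1) + x - outflow.getD (xs.length - 1) 0
          = pvCF (xs ++ [x]) outflow S R xs.length := by
        have hs := pv_sum_take_getD outflow (xs.length - 1)
        rw [h1] at hs
        simp only [pvCF, h1]
        rw [hs, List.take_length,
            List.take_of_length_le (by simp : (xs ++ [x]).length ≤ xs.length + 1),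
            List.sum_append, List.sum_cons, List.sum_nil]
        ring
      simp only [if_neg h0, List.length_append, List.length_singleton,
        Nat.add_sub_cancel, if_neg (by omega : ¬ xs.length + 1 = 0),
        Prod.mk.injEq, PySem.List.pyGetD_natCast]
      refine ⟨?_, hcur, trivial⟩
      rw [List.range_succ, List.map_append]
      congr 1
      · apply List.map_congr_left
        intro i hi
        rw [List.mem_range] at hi
        simp only [pvCF]
        rw [List.take_append_of_le_length (by omega)]
      · simp only [List.map_cons, List.map_nil]
        rw [← hcur]

lemma pv_Balt (inflow outflow : List Int) (S R : Int)
    (hpre : inflow = [] ∨ inflow.length ≤ outflow.length) :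
    get_implied_storage_alt inflow outflow S R
      = (List.range inflow.length).map (pvCF inflow outflow S R) := by
  rcases hpre with rfl | h
  · simp [get_implied_storage_alt, PySem.List.pyRange_one_eq_nil]
  · have hmax : max ((inflow.length : Int) - 1) 0 = ((inflow.length - 1 : Nat) : Int) := by
      rw [max_def]
      split <;> omega
    simp only [get_implied_storage_alt]
    rw [hmax, PySem.List.slice_zero_start, PySem.List.slice_to_natCast,
        pv_psum inflow [] 0, pv_psum (outflow.take (inflow.length - 1)) [0] 0]
    simp only [List.nil_append]
    have hm : (outflow.take (inflow.length - 1)).length = inflow.length - 1 := by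
      simp
      omega
    rw [hm, PySem.List.pyRange_zero_nat, List.map_map]
    apply List.map_congr_left
    intro i hi
    rw [List.mem_range] at hi
    simp only [Function.comp_apply, PySem.List.pyGetD_natCast]
    rw [PySem.List.getD_map_range _ _ _ _ hi]
    have hout : (([0] ++ (List.range (inflow.length - 1)).map
          (fun j => 0 + ((outflow.take (inflow.length - 1)).take (j + 1)).sum)).getD i 0)
        = (outflow.take i).sum := by
      cases i with
      | zero => simp
      | succ j =>
        simp only [List.singleton_append, List.getD_cons_succ]
        rw [PySem.List.getD_map_range _ _ _ _ (by omega)]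
        have hmin : min (j + 1) (inflow.length - 1) = j + 1 := by omega
        rw [List.take_take, hmin]
        simp only [zero_add]
    rw [hout]
    simp only [pvCF, zero_add]

-- ===== VERDICT (by name: the statement is the Claim_ definition above) =====
theorem get_implied_storage_spec : Claim_equal_get_implied_storage := by
  intro inflow outflow S R _ hpre
  unfold Spec_get_implied_storage
  unfold Pre_get_implied_storage at hpre
  rw [pv_Balt inflow outflow S R hpre]
  unfold get_implied_storage
  rw [pv_Aloop]
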